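-- pv_equiv track=rewrite | github.com/AbhinavChoudhary24167/Error-Code-Correction | sram_ecc_benchmark.py | check_bits_required
-- ===== SOURCE A (Python) =====
-- def _parity_bits_for_sec(k: int) -> int:
--     p = 1
--     while 2 ** p < k + p + 1:
--         p += 1
--     return p
--
-- def check_bits_required(scheme: str, data_bits: int = 64) -> int:
--     """Return minimum number of check bits for the given scheme."""
--     n = data_bits
--     if scheme == "Hamming_SEC":
--         return _parity_bits_for_sec(n)
--     if scheme == "SEC_DED":
--         return _parity_bits_for_sec(n) + 1
--     if scheme == "TAEC":
--         patterns = 1 + n + (n - 1) + (n - 2)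
--         p = 1
--         while 2 ** p < patterns:
--             p += 1
--         return p
--     if scheme == "DEC":
--         patterns = 1 + n + n * (n - 1) // 2
--         p = 1
--         while 2 ** p < patterns:
--             p += 1
--         return p
--     raise ValueError(f"Unknown scheme: {scheme}")
-- ===== SOURCE B (Python) =====
-- def _parity_bits_for_sec(k: int) -> int:
--     # smallest p >= 1 with 2**p >= k + p + 1, computed in closed form
--     if k <= 0:
--         return 1
--     p = (k + 1).bit_length()
--     return p if 2 ** p >= k + p + 1 else p + 1
--
-- def check_bits_required(scheme: str, data_bits: int = 64) -> int:
--     """Return minimum number of check bits for the given scheme."""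
--     n = data_bits
--     if scheme == "Hamming_SEC":
--         return _parity_bits_for_sec(n)
--     if scheme == "SEC_DED":
--         return _parity_bits_for_sec(n) + 1
--     if scheme == "TAEC":
--         patterns = 3 * n - 2
--     elif scheme == "DEC":
--         patterns = 1 + n + n * (n - 1) // 2
--     else:
--         raise ValueError(f"Unknown scheme: {scheme}")
--     # smallest p >= 1 with 2**p >= patterns
--     return 1 if patterns <= 2 else (patterns - 1).bit_length()
-- ===== Notes on version B (the rewrite author's own statement) =====
-- stated objective: alternative
-- what changed: Replaces every trial-and-error search loop (increment p while 2**p is too small, recomputing a big-int power each step) with a closed-form bit_length computation: the pattern branches return max(1,(patterns-1).bit_length()) and the SEC helper derives p from (k+1).bit_length() with at most one adjustment.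
import Mathlib
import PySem

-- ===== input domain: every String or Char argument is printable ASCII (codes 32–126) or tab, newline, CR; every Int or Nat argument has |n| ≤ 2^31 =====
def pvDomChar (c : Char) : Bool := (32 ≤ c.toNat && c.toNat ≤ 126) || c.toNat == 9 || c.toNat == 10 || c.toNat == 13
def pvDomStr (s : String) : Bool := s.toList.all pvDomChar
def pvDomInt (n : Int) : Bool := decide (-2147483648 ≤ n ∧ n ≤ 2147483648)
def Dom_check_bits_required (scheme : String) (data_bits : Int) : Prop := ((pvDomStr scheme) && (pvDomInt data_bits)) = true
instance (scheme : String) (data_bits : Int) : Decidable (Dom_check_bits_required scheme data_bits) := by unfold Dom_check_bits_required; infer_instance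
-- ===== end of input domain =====

-- B replaces A's trial-and-error power loops with closed-form bit_length computations (alternative algorithm).

-- ===== PORT A =====
-- bounds on 2^p used only for the loops' termination measures
lemma pv_pow_gt (p : Nat) : (p : Int) < 2 ^ p := by
  exact_mod_cast Nat.lt_two_pow_self

lemma pv_pow_ge (p : Nat) (hp : 1 ≤ p) : 2 * (p : Int) ≤ 2 ^ p := by
  have h := pv_pow_gt (p - 1)
  have h2 : (2:Int) ^ p = 2 * 2 ^ (p - 1) := by
    rw [← pow_succ']
    congr 1
    omega
  omega

-- the 'while 2 ** p < k + p + 1: p += 1' loop of _parity_bits_for_sec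
-- (loop counter p kept as Nat: in Python it starts at 1 and only increments)
def pvSecLoop (k : Int) (p : Nat) : Nat :=
  if (2:Int) ^ p < k + (p : Int) + 1 then pvSecLoop k (p + 1) else p
termination_by (k + 1 - (p : Int)).toNat
decreasing_by
  rename_i h
  have hp : (p : Int) < k + 1 := by
    rcases Nat.eq_zero_or_pos p with hp0 | hp1
    · subst hp0; norm_num at h; omega
    · have := pv_pow_ge p hp1; omega
  omega

def pvParityBitsForSec (k : Int) : Int := (pvSecLoop k 1 : Int)

-- the 'while 2 ** p < patterns: p += 1' loops of the TAEC and DEC branches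
def pvPatLoop (patterns : Int) (p : Nat) : Nat :=
  if (2:Int) ^ p < patterns then pvPatLoop patterns (p + 1) else p
termination_by (patterns - (p : Int)).toNat
decreasing_by
  rename_i h
  have := pv_pow_gt p
  omega

def check_bits_required (scheme : String) (data_bits : Int) : Int :=
  let n := data_bits
  if scheme = "Hamming_SEC" then pvParityBitsForSec n
  else if scheme = "SEC_DED" then pvParityBitsForSec n + 1
  else if scheme = "TAEC" then
    let patterns := 1 + n + (n - 1) + (n - 2)
    (pvPatLoop patterns 1 : Int)
  else if scheme = "DEC" then
    let patterns := 1 + n + PySem.Int.floordiv (n * (n - 1)) 2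
    (pvPatLoop patterns 1 : Int)
  else 0  -- Python raises ValueError here; excluded by Pre_

-- ===== PORT B =====
-- closed form for _parity_bits_for_sec (p kept as Nat: Python's bit_length is ≥ 0)
def pvSecClosed (k : Int) : Int :=
  if k ≤ 0 then 1
  else
    let p := PySem.Int.bitLength (k + 1)
    if k + (p : Int) + 1 ≤ 2 ^ p then (p : Int) else (p : Int) + 1

-- shared closing line of Source B's TAEC/DEC branches: 1 if patterns <= 2 else (patterns-1).bit_length()
def pvPatClosed (patterns : Int) : Int :=
  if patterns ≤ 2 then 1 else (PySem.Int.bitLength (patterns - 1) : Int)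

def check_bits_required_alt (scheme : String) (data_bits : Int) : Int :=
  let n := data_bits
  if scheme = "Hamming_SEC" then pvSecClosed n
  else if scheme = "SEC_DED" then pvSecClosed n + 1
  else if scheme = "TAEC" then pvPatClosed (3 * n - 2)
  else if scheme = "DEC" then pvPatClosed (1 + n + PySem.Int.floordiv (n * (n - 1)) 2)
  else 0  -- Source B raises ValueError here; excluded by Pre_

-- ===== PRECONDITION & SPEC =====
-- Pre_ excludes exactly the unknown schemes, on which A raises ValueError.
def Pre_check_bits_required (scheme : String) (data_bits : Int) : Prop :=
  scheme = "Hamming_SEC" ∨ scheme = "SEC_DED" ∨ scheme = "TAEC" ∨ scheme = "DEC"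
instance (scheme : String) (data_bits : Int) : Decidable (Pre_check_bits_required scheme data_bits) := by
  unfold Pre_check_bits_required; infer_instance

def pvWitness_check_bits_required : String × Int := ("Hamming_SEC", 64)

def Spec_check_bits_required (scheme : String) (data_bits : Int) (out : Int) : Prop := out = check_bits_required_alt scheme data_bits
instance (scheme : String) (data_bits : Int) (out : Int) : Decidable (Spec_check_bits_required scheme data_bits out) := by unfold Spec_check_bits_required; infer_instance

-- ===== CLAIM (what is proved, stated in full; the proofs are below) =====
def Claim_equal_check_bits_required : Prop := ∀ (scheme : String) (data_bits : Int), Dom_check_bits_required scheme data_bits → Pre_check_bits_required scheme data_bits → Spec_check_bits_required scheme data_bits (check_bits_required scheme data_bits)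

-- ===== LEMMAS AND PROOFS =====

-- the loop returns t if the condition fails at t and held at every point from p to t
lemma pvSecLoop_spec (k : Int) (t p : Nat) (hpt : p ≤ t)
    (ha : ¬ ((2:Int) ^ t < k + (t : Int) + 1))
    (hb : ∀ q : Nat, p ≤ q → q < t → (2:Int) ^ q < k + (q : Int) + 1) :
    pvSecLoop k p = t := by
  rcases eq_or_lt_of_le hpt with rfl | h
  · rw [pvSecLoop, if_neg ha]
  · rw [pvSecLoop, if_pos (hb p le_rfl h)]
    exact pvSecLoop_spec k t (p + 1) h ha (fun q hq hq' => hb q (by omega) hq')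
termination_by t - p

lemma pvPatLoop_spec (pat : Int) (t p : Nat) (hpt : p ≤ t)
    (ha : ¬ ((2:Int) ^ t < pat))
    (hb : ∀ q : Nat, p ≤ q → q < t → (2:Int) ^ q < pat) :
    pvPatLoop pat p = t := by
  rcases eq_or_lt_of_le hpt with rfl | h
  · rw [pvPatLoop, if_neg ha]
  · rw [pvPatLoop, if_pos (hb p le_rfl h)]
    exact pvPatLoop_spec pat t (p + 1) h ha (fun q hq hq' => hb q (by omega) hq')
termination_by t - p

-- bit_length brackets, cast to Int, for a positive argument
lemma pv_bl_bracket (m : Int) (hm : 1 ≤ m) :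
    (2:Int) ^ (PySem.Int.bitLength m - 1) ≤ m ∧ m < 2 ^ PySem.Int.bitLength m ∧ 1 ≤ PySem.Int.bitLength m := by
  have hne : m ≠ 0 := by omega
  have h1 := PySem.Int.two_pow_bitLength_le m hne
  have h2 := PySem.Int.lt_two_pow_bitLength m
  have habs : (m.natAbs : Int) = m := Int.natAbs_of_nonneg (by omega)
  have h1' : (2:Int) ^ (PySem.Int.bitLength m - 1) ≤ m := by
    have h1'' := Int.ofNat_le.mpr h1
    rw [habs] at h1''
    push_cast at h1''
    exact h1''
  have h2' : m < (2:Int) ^ PySem.Int.bitLength m := by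
    have h2'' := Int.ofNat_lt.mpr h2
    rw [habs] at h2''
    push_cast at h2''
    exact h2''
  refine ⟨h1', h2', ?_⟩
  by_contra hc
  have : PySem.Int.bitLength m = 0 := by omega
  rw [this] at h2'
  norm_num at h2'
  omega

-- pow monotone helper on Int with base 2
lemma pv_pow_mono {a b : Nat} (h : a ≤ b) : (2:Int) ^ a ≤ 2 ^ b :=
  pow_le_pow_right₀ (by norm_num) h

lemma pvSec_eq (k : Int) : pvParityBitsForSec k = pvSecClosed k := by
  by_cases hk : k ≤ 0
  · have hcond : ¬ ((2:Int) ^ (1:Nat) < k + ((1:Nat) : Int) + 1) := by norm_num; omega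
    rw [pvParityBitsForSec, pvSecLoop, if_neg hcond, pvSecClosed, if_pos hk]
    norm_num
  · obtain ⟨hlow, hhigh, hc1⟩ := pv_bl_bracket (k + 1) (by omega)
    set c := PySem.Int.bitLength (k + 1) with hc
    have hsucc : (2:Int) ^ c = 2 * 2 ^ (c - 1) := by
      rw [← pow_succ']; congr 1; omega
    -- for q < c the loop condition holds
    have hb : ∀ q : Nat, 1 ≤ q → q < c → (2:Int) ^ q < k + (q : Int) + 1 := by
      intro q h1 h2
      have : (2:Int) ^ q ≤ 2 ^ (c - 1) := pv_pow_mono (by omega)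
      have hq1 : (1:Int) ≤ (q : Int) := by exact_mod_cast h1
      omega
    rw [pvParityBitsForSec, pvSecClosed, if_neg (by omega)]
    by_cases hcond : k + (c : Int) + 1 ≤ 2 ^ c
    · rw [if_pos hcond]
      rw [pvSecLoop_spec k c 1 hc1 (by omega) hb]
    · rw [if_neg hcond]
      -- condition fails at c+1 : 2^(c+1) ≥ k + c + 2
      have hcc : (c - 1 : Int) ≤ (2:Int) ^ (c - 1) := by
        have := pv_pow_gt (c - 1)
        have : ((c - 1 : Nat) : Int) < 2 ^ (c - 1) := this
        omega
      have hsucc2 : (2:Int) ^ (c + 1) = 2 * 2 ^ c := by rw [← pow_succ']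
      have ha : ¬ ((2:Int) ^ (c + 1) < k + ((c + 1 : Nat) : Int) + 1) := by
        push_cast
        omega
      have hb' : ∀ q : Nat, 1 ≤ q → q < c + 1 → (2:Int) ^ q < k + (q : Int) + 1 := by
        intro q h1 h2
        rcases Nat.lt_or_ge q c with hq | hq
        · exact hb q h1 hq
        · have hqc : q = c := by omega
          subst hqc
          omega
      have := pvSecLoop_spec k (c + 1) 1 (by omega) ha hb'
      rw [this]
      push_cast
      ring
lemma pvPat_eq (pat : Int) : (pvPatLoop pat 1 : Int) = pvPatClosed pat := by
  by_cases hp : pat ≤ 2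
  · have hcond : ¬ ((2:Int) ^ (1:Nat) < pat) := by norm_num; omega
    rw [pvPatLoop, if_neg hcond, pvPatClosed, if_pos hp]
    norm_num
  · obtain ⟨hlow, hhigh, hc1⟩ := pv_bl_bracket (pat - 1) (by omega)
    set c := PySem.Int.bitLength (pat - 1) with hc
    have ha : ¬ ((2:Int) ^ c < pat) := by omega
    have hb : ∀ q : Nat, 1 ≤ q → q < c → (2:Int) ^ q < pat := by
      intro q h1 h2
      have : (2:Int) ^ q ≤ 2 ^ (c - 1) := pv_pow_mono (by omega)
      omega
    rw [pvPatClosed, if_neg (by omega), pvPatLoop_spec pat c 1 hc1 ha hb]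

-- ===== VERDICT (by name: the statement is the Claim_ definition above) =====
theorem check_bits_required_spec : Claim_equal_check_bits_required := by
  intro scheme n _ hpre
  unfold Spec_check_bits_required
  rcases hpre with rfl | rfl | rfl | rfl
  · simpa [check_bits_required, check_bits_required_alt] using pvSec_eq n
  · simpa [check_bits_required, check_bits_required_alt] using pvSec_eq n
  · have h : 1 + n + (n - 1) + (n - 2) = 3 * n - 2 := by ring
    simpa [check_bits_required, check_bits_required_alt, h] using pvPat_eq (3 * n - 2)
  · simpa [check_bits_required, check_bits_required_alt] using
      pvPat_eq (1 + n + PySem.Int.floordiv (n * (n - 1)) 2)
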